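-- pv_equiv track=rewrite | github.com/wilmurillo-ai/Design-Assistant | .skills/openclaw-skills/skills/ankechenlab-node/aegis-protocol/aegis-protocol.py | get_health_score
-- ===== SOURCE A (Python) =====
-- from typing import Dict, List, Any, Optional, Tuple
--
-- def get_health_score(checks: Dict[str, Dict[str, Any]]) -> int:
--     """计算健康度评分 (0-100)"""
--     if not checks:
--         return 0
--
--     score_map = {"ok": 100, "info": 80, "warning": 50, "error": 0}
--
--     total = 0
--     count = 0
--     for result in checks.values():
--         status = result.get("status", "ok")
--         total += score_map.get(status, 50)
--         count += 1
--
--     return int(total / count) if count > 0 else 0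
-- ===== SOURCE B (Python) =====
-- def get_health_score(checks):
--     """Closed-form over status counts: no score table, no per-element accumulation."""
--     n = len(checks)
--     if n == 0:
--         return 0
--     statuses = [r.get("status", "ok") for r in checks.values()]
--     ok = statuses.count("ok")
--     info = statuses.count("info")
--     error = statuses.count("error")
--     total = 100 * ok + 80 * info + 50 * (n - ok - info - error)
--     return total // n
-- ===== Notes on version B (the rewrite author's own statement) =====
-- stated objective: alternative
-- what changed: B replaces A's per-element dict-lookup running sum by a closed-form aggregation over status counts: it counts the 'ok'/'info'/'error' statuses with list.count and computes 100*ok + 80*info + 50*(rest) directly (warning and unknown statuses both score 50, so they share one bucket), then uses exact integer division.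
import Mathlib
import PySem

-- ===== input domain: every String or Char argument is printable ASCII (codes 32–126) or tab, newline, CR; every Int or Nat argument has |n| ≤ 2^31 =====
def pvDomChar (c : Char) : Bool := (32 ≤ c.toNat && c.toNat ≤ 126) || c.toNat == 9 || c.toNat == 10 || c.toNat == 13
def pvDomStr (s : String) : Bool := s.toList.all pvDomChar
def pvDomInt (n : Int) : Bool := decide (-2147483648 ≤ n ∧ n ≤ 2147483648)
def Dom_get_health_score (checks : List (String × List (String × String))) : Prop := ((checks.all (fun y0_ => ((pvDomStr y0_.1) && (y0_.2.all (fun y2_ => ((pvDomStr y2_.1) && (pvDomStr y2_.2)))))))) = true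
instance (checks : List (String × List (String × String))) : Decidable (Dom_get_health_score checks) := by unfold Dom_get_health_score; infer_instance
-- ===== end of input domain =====

-- B replaces A's per-element score-dict running sum by a closed-form aggregation over
-- status counts (100*ok + 80*info + 50*rest; warning and unknown statuses share the
-- 50 bucket), followed by one exact integer division: an alternative decomposition.

-- ===== PORT A =====
def get_health_score (checks : List (String × List (String × String))) : Int :=
  if checks = [] then 0
  else
    let score_map : PySem.Dict String Int := ⟨[("ok", 100), ("info", 80), ("warning", 50), ("error", 0)]⟩
    let tc : Int × Int := checks.foldl (fun tc kv =>
      (tc.1 + PySem.Dict.getD score_map (PySem.Dict.getD ⟨kv.2⟩ "status" "ok") 50, tc.2 + 1)) (0, 0)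
    if tc.2 > 0 then PySem.Int.truncdiv tc.1 tc.2 else 0

-- ===== PORT B =====
def get_health_score_alt (checks : List (String × List (String × String))) : Int :=
  let n : Int := checks.length
  if n = 0 then 0
  else
    let statuses : List String := checks.map (fun kv => PySem.Dict.getD ⟨kv.2⟩ "status" "ok")
    let ok : Int := PySem.List.count statuses "ok"
    let info : Int := PySem.List.count statuses "info"
    let error : Int := PySem.List.count statuses "error"
    let total : Int := 100 * ok + 80 * info + 50 * (n - ok - info - error)
    PySem.Int.floordiv total n

-- ===== PRECONDITION & SPEC =====
def Spec_get_health_score (checks : List (String × List (String × String))) (out : Int) : Prop := out = get_health_score_alt checks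
instance (checks : List (String × List (String × String))) (out : Int) : Decidable (Spec_get_health_score checks out) := by unfold Spec_get_health_score; infer_instance

-- ===== CLAIM (what is proved, stated in full; the proofs are below) =====
def Claim_equal_get_health_score : Prop := ∀ (checks : List (String × List (String × String))), Dom_get_health_score checks → Spec_get_health_score checks (get_health_score checks)

-- ===== LEMMAS AND PROOFS =====

-- proof-side abbreviations: the status of one check, the score of one status
def pvStatus (kv : String × List (String × String)) : String :=
  PySem.Dict.getD ⟨kv.2⟩ "status" "ok"

def pvScore (s : String) : Int :=
  PySem.Dict.getD ⟨[("ok", (100:Int)), ("info", 80), ("warning", 50), ("error", 0)]⟩ s 50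

theorem pvScore_eq (s : String) :
    pvScore s = if s = "ok" then 100 else if s = "info" then 80
      else if s = "error" then 0 else 50 := by
  unfold pvScore
  simp only [PySem.Dict.getD, PySem.Dict.get?, List.find?_cons]
  by_cases h1 : s = "ok"
  · subst h1; decide
  by_cases h2 : s = "info"
  · subst h2; decide
  by_cases h3 : s = "warning"
  · subst h3; decide
  by_cases h4 : s = "error"
  · subst h4; decide
  have e1 : ("ok" == s) = false := beq_eq_false_iff_ne.mpr fun h => h1 h.symm
  have e2 : ("info" == s) = false := beq_eq_false_iff_ne.mpr fun h => h2 h.symm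
  have e3 : ("warning" == s) = false := beq_eq_false_iff_ne.mpr fun h => h3 h.symm
  have e4 : ("error" == s) = false := beq_eq_false_iff_ne.mpr fun h => h4 h.symm
  simp [e1, e2, e3, e4, h1, h2, h4]

theorem pvScore_nonneg (s : String) : 0 ≤ pvScore s := by
  rw [pvScore_eq]; split_ifs <;> norm_num

-- the sum of scores over a status list equals B's closed form in the three counts
theorem pv_sum_score (sts : List String) :
    (sts.map pvScore).sum
      = 100 * (sts.count "ok" : Int) + 80 * (sts.count "info" : Int)
        + 50 * ((sts.length : Int) - (sts.count "ok" : Int)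
                - (sts.count "info" : Int) - (sts.count "error" : Int)) := by
  induction sts with
  | nil => simp
  | cons s t ih =>
    simp only [List.map_cons, List.sum_cons, List.count_cons, List.length_cons, ih,
      beq_iff_eq, pvScore_eq]
    by_cases h1 : s = "ok" <;> by_cases h2 : s = "info" <;> by_cases h3 : s = "error" <;>
      simp_all <;> ring

-- ===== VERDICT (by name: the statement is the Claim_ definition above) =====
theorem get_health_score_spec : Claim_equal_get_health_score := by
  intro checks _
  unfold Spec_get_health_score get_health_score get_health_score_alt
  by_cases hnil : checks = []
  · simp [hnil]
  · have hlen : (0:Int) < checks.length := by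
      have := List.length_pos_iff.mpr hnil
      exact_mod_cast this
    simp only [hnil, if_false, show ((checks.length : Int) = 0) = False from by
      simp; omega, if_false]
    -- A's running pair fold computes (Σ pvScore∘pvStatus, length)
    have hA : checks.foldl (fun (tc : Int × Int) kv =>
        (tc.1 + pvScore (pvStatus kv), tc.2 + 1)) (0, 0)
        = ((checks.map (fun kv => pvScore (pvStatus kv))).sum, (checks.length : Int)) := by
      rw [PySem.List.foldl_prod_mk (fun (a : Int) kv => a + pvScore (pvStatus kv))
            (fun (a : Int) _ => a + 1) checks 0 0,
          PySem.List.foldl_add checks (fun kv => pvScore (pvStatus kv)) 0,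
          PySem.List.foldl_add checks (fun _ => (1 : Int)) 0]
      simp
    simp only [pvStatus, pvScore] at hA
    rw [hA]
    simp only [if_pos hlen]
    -- both sides are the same total over the same divisor
    have hsum := pv_sum_score (checks.map pvStatus)
    simp only [List.map_map, Function.comp_def, List.length_map] at hsum
    simp only [pvStatus, pvScore] at hsum
    rw [hsum]
    have hnonneg : (0:Int) ≤ ((checks.map pvStatus).map pvScore).sum := by
      refine List.sum_nonneg ?_
      intro x hx
      rcases List.mem_map.mp hx with ⟨s, _, rfl⟩
      exact pvScore_nonneg s
    simp only [List.map_map, Function.comp_def] at hnonneg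
    simp only [pvStatus, pvScore] at hnonneg
    rw [hsum] at hnonneg
    rw [PySem.List.count_eq, PySem.List.count_eq, PySem.List.count_eq]
    rw [PySem.Int.floordiv_eq_ediv_of_pos hlen]
    unfold PySem.Int.truncdiv
    exact Int.tdiv_eq_ediv_of_nonneg hnonneg
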